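-- pv_equiv track=rewrite | github.com/bodybuilders-team/isel-leic-cd-g15 | src/phase01/ex04/LZ77_Tokenizer.py | LZ77_get_token
-- ===== SOURCE A (Python) =====
-- def LZ77_get_token(sw, lab):
--     """
--     Gets the token for the look-ahead-buffer in the search window.
--
--     :param sw: search window
--     :param lab: look-ahead buffer
--     :return: token
--     """
--
--     sw_len = len(sw)
--     lab_len = len(lab)
--
--     if lab_len == 0:
--         return -1, -1, ""
--
--     if sw_len == 0:
--         return 0, 0, lab[0]
--
--     best_length = 0
--     best_position = 0
--
--     for i in range(sw_len):
--         length = 0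
--         while i + length < sw_len and length < lab_len and sw[i + length] == lab[length]:
--             length += 1
--
--         if length > best_length:
--             best_position = i
--             best_length = length
--
--     innovation_symbol = lab[best_length - 1] if best_length == lab_len else lab[best_length]
--
--     return best_position, best_length, innovation_symbol
-- ===== SOURCE B (Python) =====
-- def LZ77_get_token(sw, lab):
--     """
--     Gets the token for the look-ahead-buffer in the search window.
--     Binary search on the match length (prefix occurrence is monotone),
--     delegating the scan to str.find / the `in` operator.
--     """
--     if not lab:
--         return -1, -1, ""
--     if not sw:
--         return 0, 0, lab[0]
--
--     lo, hi = 0, min(len(lab), len(sw))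
--     while lo < hi:
--         mid = (lo + hi + 1) // 2
--         if lab[:mid] in sw:
--             lo = mid
--         else:
--             hi = mid - 1
--
--     pos = sw.find(lab[:lo])
--     sym = lab[lo - 1] if lo == len(lab) else lab[lo]
--     return pos, lo, sym
-- ===== Notes on version B (the rewrite author's own statement) =====
-- stated objective: faster
-- what changed: Replaces A's per-position character-by-character rescan of the whole search window with a binary search on the match length (prefix occurrence is monotone in the length) whose probes are single C-level substring searches ('in' / str.find), then one find for the position.
import Mathlib
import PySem

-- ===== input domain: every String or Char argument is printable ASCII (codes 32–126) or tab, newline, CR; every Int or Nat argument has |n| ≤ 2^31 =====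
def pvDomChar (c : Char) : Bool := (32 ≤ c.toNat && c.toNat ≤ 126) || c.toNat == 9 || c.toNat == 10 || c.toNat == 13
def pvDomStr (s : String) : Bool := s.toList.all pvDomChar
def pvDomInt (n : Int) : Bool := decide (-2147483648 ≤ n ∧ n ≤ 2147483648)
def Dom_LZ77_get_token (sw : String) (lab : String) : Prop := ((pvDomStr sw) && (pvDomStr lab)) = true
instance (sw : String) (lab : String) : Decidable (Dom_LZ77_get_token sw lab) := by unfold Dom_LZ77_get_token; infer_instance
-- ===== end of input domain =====

-- B replaces A's per-position rescan by a binary search on the match length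
-- (prefix occurrence in sw is monotone in the length) over substring search; same token proved.

-- ===== PORT A =====

-- Python `s[k]` fetched as a 1-character string (both Pythons index only in range).
def pvChar (o : Option Char) : String :=
  match o with
  | some c => String.ofList [c]
  | none => ""

-- A's inner `while` loop: extend the match at position i.
def pvMatchLen (s l : List Char) (i k : Nat) : Nat :=
  if h : i + k < s.length ∧ k < l.length ∧ s[i + k]? = l[k]? then
    pvMatchLen s l i (k + 1)
  else k
termination_by s.length - (i + k)
decreasing_by omega

def LZ77_get_token (sw : String) (lab : String) : Int × Int × String :=
  let s := sw.toList
  let l := lab.toList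
  let sw_len := s.length
  let lab_len := l.length
  if lab_len = 0 then (-1, -1, "")
  else if sw_len = 0 then (0, 0, pvChar l[0]?)
  else
    let bp := (List.range sw_len).foldl
      (fun (acc : Nat × Nat) i =>
        let length := pvMatchLen s l i 0
        if acc.2 < length then (i, length) else acc) (0, 0)
    let innovation :=
      if bp.2 = lab_len then pvChar l[bp.2 - 1]? else pvChar l[bp.2]?
    ((bp.1 : Int), (bp.2 : Int), innovation)

-- ===== PORT B =====

-- B's `while lo < hi` binary search for the largest L with lab[:L] occurring in sw.
def pvBinSearch (s l : List Char) (lo hi : Nat) : Nat :=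
  if lo < hi then
    let mid := (lo + hi + 1) / 2
    if PySem.Chars.isIn (l.take mid) s then pvBinSearch s l mid hi
    else pvBinSearch s l lo (mid - 1)
  else lo
termination_by hi - lo
decreasing_by all_goals omega

def LZ77_get_token_alt (sw : String) (lab : String) : Int × Int × String :=
  let s := sw.toList
  let l := lab.toList
  if l.length = 0 then (-1, -1, "")
  else if s.length = 0 then (0, 0, pvChar l[0]?)
  else
    let L := pvBinSearch s l 0 (min l.length s.length)
    let pos := PySem.Chars.find s (l.take L)
    let sym := if L = l.length then pvChar l[L - 1]? else pvChar l[L]?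
    (pos, (L : Int), sym)

-- ===== PRECONDITION & SPEC =====
def Spec_LZ77_get_token (sw : String) (lab : String) (out : Int × Int × String) : Prop := out = LZ77_get_token_alt sw lab
instance (sw : String) (lab : String) (out : Int × Int × String) : Decidable (Spec_LZ77_get_token sw lab out) := by unfold Spec_LZ77_get_token; infer_instance

-- ===== CLAIM (what is proved, stated in full; the proofs are below) =====
def Claim_equal_LZ77_get_token : Prop := ∀ (sw : String) (lab : String), Dom_LZ77_get_token sw lab → Spec_LZ77_get_token sw lab (LZ77_get_token sw lab)

-- ===== LEMMAS AND PROOFS =====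

-- `l.take L` matches in s at position i, stated elementwise.
def pvGood (s l : List Char) (i L : Nat) : Prop :=
  L ≤ l.length ∧ ∀ j < L, s[i + j]? = l[j]?

lemma pvGood_iff_prefix (s l : List Char) (i L : Nat) (hL : L ≤ l.length) :
    pvGood s l i L ↔ l.take L <+: s.drop i := by
  unfold pvGood
  rw [List.prefix_iff_eq_take, List.length_take, Nat.min_eq_left hL]
  constructor
  · rintro ⟨-, h⟩
    apply List.ext_getElem?
    intro j
    simp only [List.getElem?_take, List.getElem?_drop]
    split_ifs with hj
    · exact (h j hj).symm
    · rfl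
  · intro h
    refine ⟨hL, fun j hj => ?_⟩
    have := congrArg (fun t => t[j]?) h
    simp only [List.getElem?_take, List.getElem?_drop, if_pos hj] at this
    exact this.symm

lemma pvMatchLen_le_self (s l : List Char) (i k : Nat) : k ≤ pvMatchLen s l i k := by
  fun_induction pvMatchLen s l i k with
  | case1 k hc ih => omega
  | case2 k hc => omega

lemma pvMatchLen_good (s l : List Char) (i k : Nat) (h : pvGood s l i k) :
    pvGood s l i (pvMatchLen s l i k) := by
  fun_induction pvMatchLen s l i k with
  | case1 k hc ih =>
    apply ih
    obtain ⟨h1, h2⟩ := h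
    refine ⟨hc.2.1, fun j hj => ?_⟩
    by_cases hjk : j < k
    · exact h2 j hjk
    · have : j = k := by omega
      subst this; exact hc.2.2
  | case2 k hc => exact h

lemma pvMatchLen_max (s l : List Char) (i k L : Nat) (hk : k ≤ L) (hL : pvGood s l i L) :
    L ≤ pvMatchLen s l i k := by
  fun_induction pvMatchLen s l i k with
  | case1 k hc ih =>
    by_cases hkL : k + 1 ≤ L
    · exact ih hkL
    · have := pvMatchLen_le_self s l i (k + 1)
      omega
  | case2 k hc =>
    by_cases hkL : k = L
    · omega
    · exfalso
      obtain ⟨h1, h2⟩ := hL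
      have hj := h2 k (by omega)
      have hkl : k < l.length := by omega
      have hx : s[i + k]? = some l[k] := by
        rw [hj, List.getElem?_eq_getElem hkl]
      obtain ⟨hlt, -⟩ := List.getElem?_eq_some_iff.mp hx
      exact hc ⟨hlt, by omega, hj⟩

lemma pvIsIn_mono (s l : List Char) {L L' : Nat} (h : L ≤ L')
    (hIn : PySem.Chars.isIn (l.take L') s = true) : PySem.Chars.isIn (l.take L) s = true := by
  rw [PySem.Chars.isIn_iff_infix] at *
  have h1 : l.take L <+: l.take L' := by
    simpa [List.take_take, Nat.min_eq_left h] using List.take_prefix L (l.take L')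
  exact h1.isInfix.trans hIn

lemma pvBinSearch_spec (s l : List Char) (lo hi : Nat) :
    PySem.Chars.isIn (l.take lo) s = true → lo ≤ hi →
    lo ≤ pvBinSearch s l lo hi ∧ pvBinSearch s l lo hi ≤ hi ∧
    PySem.Chars.isIn (l.take (pvBinSearch s l lo hi)) s = true ∧
    ∀ L, pvBinSearch s l lo hi < L → L ≤ hi → PySem.Chars.isIn (l.take L) s = false := by
  fun_induction pvBinSearch s l lo hi with
  | case1 lo hi hlt mid hIn ih =>
    intro hlo hle
    obtain ⟨i1, i2, i3, i4⟩ := ih hIn (by omega)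
    exact ⟨by omega, i2, i3, i4⟩
  | case2 lo hi hlt mid hIn ih =>
    intro hlo hle
    obtain ⟨i1, i2, i3, i4⟩ := ih hlo (by omega)
    refine ⟨i1, by omega, i3, fun L hL1 hL2 => ?_⟩
    by_cases hL3 : L ≤ mid - 1
    · exact i4 L hL1 hL3
    · cases hc : PySem.Chars.isIn (l.take L) s with
      | false => rfl
      | true =>
        have := pvIsIn_mono s l (show mid ≤ L by omega) hc
        simp [this] at hIn
  | case3 lo hi hge =>
    intro hlo hle
    exact ⟨le_refl _, by omega, hlo, fun L h1 h2 => by omega⟩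

-- A's outer loop computes the maximal match length and its first position.
lemma pvFold_spec (s l : List Char) (n : Nat) :
    ((List.range n).foldl
      (fun (acc : Nat × Nat) i =>
        let length := pvMatchLen s l i 0
        if acc.2 < length then (i, length) else acc) (0, 0) = (0, 0) ∧
        ∀ i < n, pvMatchLen s l i 0 = 0) ∨
    (((List.range n).foldl
      (fun (acc : Nat × Nat) i =>
        let length := pvMatchLen s l i 0
        if acc.2 < length then (i, length) else acc) (0, 0)).1 < n ∧
      pvMatchLen s l (((List.range n).foldl
      (fun (acc : Nat × Nat) i =>
        let length := pvMatchLen s l i 0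
        if acc.2 < length then (i, length) else acc) (0, 0)).1) 0 = (((List.range n).foldl
      (fun (acc : Nat × Nat) i =>
        let length := pvMatchLen s l i 0
        if acc.2 < length then (i, length) else acc) (0, 0)).2) ∧
      (∀ i < n, pvMatchLen s l i 0 ≤ (((List.range n).foldl
      (fun (acc : Nat × Nat) i =>
        let length := pvMatchLen s l i 0
        if acc.2 < length then (i, length) else acc) (0, 0)).2)) ∧
      (∀ i < (((List.range n).foldl
      (fun (acc : Nat × Nat) i =>
        let length := pvMatchLen s l i 0
        if acc.2 < length then (i, length) else acc) (0, 0)).1), pvMatchLen s l i 0 < (((List.range n).foldl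
      (fun (acc : Nat × Nat) i =>
        let length := pvMatchLen s l i 0
        if acc.2 < length then (i, length) else acc) (0, 0)).2)) ∧
      0 < (((List.range n).foldl
      (fun (acc : Nat × Nat) i =>
        let length := pvMatchLen s l i 0
        if acc.2 < length then (i, length) else acc) (0, 0)).2)) := by
  induction n with
  | zero => left; exact ⟨rfl, fun i hi => by omega⟩
  | succ n ih =>
    rw [List.range_succ, List.foldl_append, List.foldl_cons, List.foldl_nil]
    set r := (List.range n).foldl
      (fun (acc : Nat × Nat) i =>
        let length := pvMatchLen s l i 0
        if acc.2 < length then (i, length) else acc) (0, 0) with hr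
    rcases ih with ⟨h0, hall⟩ | ⟨h1, h2, h3, h4, h5⟩
    · rw [h0]
      simp only []
      by_cases hn : (0 : Nat) < pvMatchLen s l n 0
      · rw [if_pos hn]
        right
        refine ⟨by omega, rfl, fun i hi => ?_, fun i hi => ?_, hn⟩
        · by_cases hin : i < n
          · rw [hall i hin]; omega
          · have : i = n := by omega
            subst this; omega
        · rw [hall i hi]; omega
      · rw [if_neg hn]
        left
        refine ⟨rfl, fun i hi => ?_⟩
        by_cases hin : i < n
        · exact hall i hin
        · have : i = n := by omega
          subst this; omega
    · simp only []
      by_cases hn : r.2 < pvMatchLen s l n 0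
      · rw [if_pos hn]
        right
        refine ⟨by omega, rfl, fun i hi => ?_, fun i hi => ?_, by omega⟩
        · by_cases hin : i < n
          · have := h3 i hin; omega
          · have : i = n := by omega
            subst this; omega
        · have := h3 i (by omega); omega
      · rw [if_neg hn]
        right
        refine ⟨by omega, h2, fun i hi => ?_, h4, h5⟩
        by_cases hin : i < n
        · exact h3 i hin
        · have : i = n := by omega
          subst this; omega

-- The best (position, length) found by A equals B's (find, binary-search length).
lemma pvMain (s l : List Char) :
    (((List.range s.length).foldl
      (fun (acc : Nat × Nat) i =>
        let length := pvMatchLen s l i 0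
        if acc.2 < length then (i, length) else acc) (0, 0)).2
      = pvBinSearch s l 0 (min l.length s.length)) ∧
    ((((List.range s.length).foldl
      (fun (acc : Nat × Nat) i =>
        let length := pvMatchLen s l i 0
        if acc.2 < length then (i, length) else acc) (0, 0)).1 : Int)
      = PySem.Chars.find s (l.take (pvBinSearch s l 0 (min l.length s.length)))) := by
  set r := (List.range s.length).foldl
      (fun (acc : Nat × Nat) i =>
        let length := pvMatchLen s l i 0
        if acc.2 < length then (i, length) else acc) (0, 0) with hr
  set L := pvBinSearch s l 0 (min l.length s.length) with hLdef
  obtain ⟨-, hL2, hL3, hL4⟩ := pvBinSearch_spec s l 0 (min l.length s.length)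
    (by simp [PySem.Chars.isIn_nil]) (Nat.zero_le _)
  have hF := pvFold_spec s l s.length
  rw [← hr] at hF
  rcases hF with ⟨hr0, hall⟩ | ⟨h1, h2, h3, h4, h5⟩
  · -- no position matches at all: the best length is 0 and L = 0
    have hL0 : L = 0 := by
      by_contra hne
      obtain ⟨j, hj⟩ := (PySem.Chars.exists_prefix_drop_iff_isIn (l.take L) s).mpr hL3
      have hLlen : L ≤ l.length := le_trans hL2 (Nat.min_le_left _ _)
      have hgood : pvGood s l j L := (pvGood_iff_prefix s l j L hLlen).mpr hj
      have hjlt : j < s.length := by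
        have := hj.length_le
        rw [List.length_take, List.length_drop, Nat.min_eq_left hLlen] at this
        omega
      have := pvMatchLen_max s l j 0 L (Nat.zero_le L) hgood
      rw [hall j hjlt] at this
      omega
    rw [hr0, hL0]
    exact ⟨rfl, by simp [PySem.Chars.find_nil]⟩
  · have hgood : pvGood s l r.1 r.2 := by
      have := pvMatchLen_good s l r.1 0 ⟨Nat.zero_le _, fun j hj => absurd hj (Nat.not_lt_zero j)⟩
      rwa [h2] at this
    have hble : r.2 ≤ l.length := hgood.1
    have hbs2 : r.2 ≤ s.length := by
      have hj := hgood.2 (r.2 - 1) (by omega)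
      have hkl : r.2 - 1 < l.length := by omega
      have hx : s[r.1 + (r.2 - 1)]? = some l[r.2 - 1] := by
        rw [hj, List.getElem?_eq_getElem hkl]
      obtain ⟨hlt, -⟩ := List.getElem?_eq_some_iff.mp hx
      omega
    have hbprefix : l.take r.2 <+: s.drop r.1 := (pvGood_iff_prefix s l r.1 r.2 hble).mp hgood
    have hbIn : PySem.Chars.isIn (l.take r.2) s = true :=
      (PySem.Chars.exists_prefix_drop_iff_isIn _ s).mp ⟨r.1, hbprefix⟩
    have hbL : r.2 = L := by
      have hLe : r.2 ≤ L := by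
        by_contra hlt
        have := hL4 r.2 (by omega) (by exact le_min hble hbs2)
        simp [hbIn] at this
      have hGe : L ≤ r.2 := by
        obtain ⟨j, hj⟩ := (PySem.Chars.exists_prefix_drop_iff_isIn (l.take L) s).mpr hL3
        by_cases hL0 : L = 0
        · omega
        have hLlen : L ≤ l.length := le_trans hL2 (Nat.min_le_left _ _)
        have hgoodj : pvGood s l j L := (pvGood_iff_prefix s l j L hLlen).mpr hj
        have hjlt : j < s.length := by
          have := hj.length_le
          rw [List.length_take, List.length_drop, Nat.min_eq_left hLlen] at this
          omega
        have hFj := pvMatchLen_max s l j 0 L (Nat.zero_le L) hgoodj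
        have := h3 j hjlt
        omega
      omega
    refine ⟨hbL, ?_⟩
    rw [← hbL]
    have hnn : 0 ≤ PySem.Chars.find s (l.take r.2) :=
      (PySem.Chars.find_nonneg_iff _ _).mpr ((PySem.Chars.isIn_iff_infix _ _).mp hbIn)
    obtain ⟨hq1, hq2⟩ := PySem.Chars.find_spec hnn
    set q := (PySem.Chars.find s (l.take r.2)).toNat with hq
    have hqp : q ≤ r.1 := by
      by_contra hlt
      exact hq2 r.1 (by omega) hbprefix
    have hpq : r.1 ≤ q := by
      by_contra hlt
      have hqs : q < s.length := by
        have := hq1.length_le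
        rw [List.length_take, List.length_drop, Nat.min_eq_left hble] at this
        omega
      have hgoodq : pvGood s l q r.2 := (pvGood_iff_prefix s l q r.2 hble).mpr hq1
      have hq3 := pvMatchLen_max s l q 0 r.2 (Nat.zero_le _) hgoodq
      have := h4 q (by omega)
      omega
    have hqr : q = r.1 := by omega
    rw [← hqr, hq]
    exact Int.toNat_of_nonneg hnn

-- ===== VERDICT (by name: the statement is the Claim_ definition above) =====
theorem LZ77_get_token_spec : Claim_equal_LZ77_get_token := by
  intro sw lab _
  unfold Spec_LZ77_get_token LZ77_get_token LZ77_get_token_alt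
  by_cases h0 : lab.toList.length = 0
  · simp only [if_pos h0]
  by_cases h1 : sw.toList.length = 0
  · simp only [if_neg h0, if_pos h1]
  · simp only [if_neg h0, if_neg h1]
    obtain ⟨hb, hp⟩ := pvMain sw.toList lab.toList
    rw [hb, hp]
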